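-- pv_equiv track=rewrite | github.com/qhu-xyz/research-qianli-v2 | research-spice-shadow-price-pred-qianli/scripts/run_experiment.py | _interleave_runs
-- ===== SOURCE A (Python) =====
-- def _interleave_runs(runs: list[tuple]) -> list[tuple]:
--     """Reorder runs via round-robin across auction months.
--
--     This spreads concurrent workers across different auction months so they
--     don't all try to load the same month's data simultaneously.  Runs are
--     grouped by (auction_month, class_type) and dealt out in rotation.
--
--     Parameters
--     ----------
--     runs : list[tuple]
--         Each element is (planning_year, auction_month, season, class_type, period_type).
--
--     Returns
--     -------
--     list[tuple]
--         Same elements, reordered.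
--     """
--     from collections import OrderedDict
--
--     buckets: OrderedDict[str, list] = OrderedDict()
--     for run in runs:
--         key = f"{run[1]}_{run[3]}"  # auction_month + class_type
--         buckets.setdefault(key, []).append(run)
--
--     interleaved = []
--     bucket_iters = [iter(v) for v in buckets.values()]
--     while bucket_iters:
--         next_round_iters = []
--         for it in bucket_iters:
--             item = next(it, None)
--             if item is not None:
--                 interleaved.append(item)
--                 next_round_iters.append(it)
--         bucket_iters = next_round_iters
--
--     return interleaved
-- ===== SOURCE B (Python) =====
-- def _interleave_runs(runs: list[tuple]) -> list[tuple]: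
--     """Round-robin reorder: group by (auction_month, class_type), then deal
--     the buckets out column-wise by index instead of iterators."""
--     buckets: dict[str, list] = {}
--     for run in runs:
--         key = f"{run[1]}_{run[3]}"
--         buckets.setdefault(key, []).append(run)
--
--     bucket_lists = list(buckets.values())
--     maxlen = max((len(b) for b in bucket_lists), default=0)
--     out = []
--     for r in range(maxlen):
--         for b in bucket_lists:
--             if r < len(b):
--                 out.append(b[r])
--     return out
-- ===== Notes on version B (the rewrite author's own statement) =====
-- stated objective: simpler
-- what changed: Replaces the live-iterator worklist (rebuilding a list of iterators each round with a None sentinel) by a column-wise pass: compute maxlen once and index each bucket at r for r in range(maxlen).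
import Mathlib
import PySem

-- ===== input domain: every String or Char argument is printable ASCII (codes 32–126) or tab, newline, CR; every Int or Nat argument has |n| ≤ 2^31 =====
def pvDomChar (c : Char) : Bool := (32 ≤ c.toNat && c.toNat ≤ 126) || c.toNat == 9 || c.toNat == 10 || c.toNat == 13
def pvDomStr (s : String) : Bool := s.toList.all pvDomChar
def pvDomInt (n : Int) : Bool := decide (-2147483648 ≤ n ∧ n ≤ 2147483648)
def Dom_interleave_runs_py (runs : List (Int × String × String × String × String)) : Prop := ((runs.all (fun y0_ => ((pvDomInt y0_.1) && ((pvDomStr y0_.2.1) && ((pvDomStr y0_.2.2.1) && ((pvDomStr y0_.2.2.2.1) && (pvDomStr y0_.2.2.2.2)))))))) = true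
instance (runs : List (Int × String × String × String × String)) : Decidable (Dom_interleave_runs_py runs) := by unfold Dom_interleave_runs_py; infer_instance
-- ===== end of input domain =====

-- B replaces A's iterator worklist (rebuilt each round, None sentinel) by a single
-- column-wise indexed pass over the bucket lists; objective: simpler. Return value only.

-- ===== PORT A =====
-- grouping loop, identical in both Pythons: buckets.setdefault(key, []).append(run)
def pvKey (run : Int × String × String × String × String) : String :=
  run.2.1 ++ "_" ++ run.2.2.2.1

def pvBuckets (runs : List (Int × String × String × String × String)) :
    PySem.Dict String (List (Int × String × String × String × String)) :=
  runs.foldl (fun d run => d.modify (pvKey run) [] (· ++ [run])) PySem.Dict.empty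

-- one round of A's inner for-loop: collects next(it) of each iterator that still
-- yields (item ≠ None) and the surviving iterators, in order
def pvRound {α : Type} : List (List α) → List α × List (List α)
  | [] => ([], [])
  | it :: rest =>
    let p := pvRound rest
    match it with
    | [] => p
    | x :: xs => (x :: p.1, xs :: p.2)

def pvMu {α : Type} (its : List (List α)) : Nat := (its.map List.length).sum + its.length

theorem pvRound_mu_le {α : Type} (its : List (List α)) : pvMu (pvRound its).2 ≤ pvMu its := by
  induction its with
  | nil => simp [pvRound, pvMu]
  | cons it rest ih =>
    cases it with
    | nil => simp [pvRound, pvMu] at ih ⊢; omega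
    | cons x xs => simp [pvRound, pvMu] at ih ⊢; omega

theorem pvRound_mu_lt {α : Type} (its : List (List α)) (h : its ≠ []) :
    pvMu (pvRound its).2 < pvMu its := by
  cases its with
  | nil => exact absurd rfl h
  | cons it rest =>
    have hle := pvRound_mu_le rest
    cases it with
    | nil => simp [pvRound, pvMu] at hle ⊢; omega
    | cons x xs => simp [pvRound, pvMu] at hle ⊢; omega

-- A's while-loop: while bucket_iters: deal a round, keep survivors
def pvLoop {α : Type} (acc : List α) (its : List (List α)) : List α :=
  if h : its = [] then acc
  else pvLoop (acc ++ (pvRound its).1) (pvRound its).2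
termination_by pvMu its
decreasing_by exact pvRound_mu_lt its h

def interleave_runs_py (runs : List (Int × String × String × String × String)) :
    List (Int × String × String × String × String) :=
  pvLoop [] (pvBuckets runs).values

-- ===== PORT B =====
def interleave_runs_py_alt (runs : List (Int × String × String × String × String)) :
    List (Int × String × String × String × String) :=
  let bucket_lists := (pvBuckets runs).values
  let maxlen := (bucket_lists.map List.length).foldl max 0  -- max(…, default=0)
  (List.range maxlen).foldl (fun out r =>
    bucket_lists.foldl (fun out b =>
      -- b[r] under the guard r < len(b); getD's default is never used
      if r < b.length then out ++ [b.getD r default] else out) out) []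

-- ===== PRECONDITION & SPEC =====
def Spec_interleave_runs_py (runs : List (Int × String × String × String × String)) (out : List (Int × String × String × String × String)) : Prop := out = interleave_runs_py_alt runs
instance (runs : List (Int × String × String × String × String)) (out : List (Int × String × String × String × String)) : Decidable (Spec_interleave_runs_py runs out) := by unfold Spec_interleave_runs_py; infer_instance

-- ===== CLAIM (what is proved, stated in full; the proofs are below) =====
def Claim_equal_interleave_runs_py : Prop := ∀ (runs : List (Int × String × String × String × String)), Dom_interleave_runs_py runs → Spec_interleave_runs_py runs (interleave_runs_py runs)

-- ===== LEMMAS AND PROOFS =====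

-- column r of the buckets: exactly what B's inner loop appends for a given r
def pvCol {α : Type} [Inhabited α] (r : Nat) (ls : List (List α)) : List α :=
  (ls.filter (fun b => decide (r < b.length))).map (fun b => b.getD r default)

theorem pvRound_fst {α : Type} [Inhabited α] (ls : List (List α)) :
    (pvRound ls).1 = pvCol 0 ls := by
  induction ls with
  | nil => simp [pvRound, pvCol]
  | cons it rest ih =>
    cases it with
    | nil => simpa [pvRound, pvCol] using ih
    | cons x xs => simpa [pvRound, pvCol] using ih

theorem pvRound_snd {α : Type} (ls : List (List α)) :
    (pvRound ls).2 = (ls.filter (fun b => !b.isEmpty)).map List.tail := by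
  induction ls with
  | nil => simp [pvRound]
  | cons it rest ih =>
    cases it with
    | nil => simpa [pvRound] using ih
    | cons x xs => simpa [pvRound] using ih

theorem pvCol_succ {α : Type} [Inhabited α] (r : Nat) (ls : List (List α)) :
    pvCol (r + 1) ls = pvCol r ((ls.filter (fun b => !b.isEmpty)).map List.tail) := by
  induction ls with
  | nil => simp [pvCol]
  | cons it rest ih =>
    cases it with
    | nil => simpa [pvCol] using ih
    | cons x xs =>
      by_cases h : r < xs.length
      · simp [pvCol, h] at ih ⊢
        exact ih
      · simp [pvCol, h] at ih ⊢
        exact ih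

theorem pvFoldl_max_eq (l : List Nat) (a : Nat) : l.foldl max a = max a (l.foldr max 0) := by
  induction l generalizing a with
  | nil => simp
  | cons x xs ih => simp [List.foldl_cons, List.foldr_cons, ih (max a x)]

def pvN {α : Type} (ls : List (List α)) : Nat := (ls.map List.length).foldr max 0

theorem pvN_eq {α : Type} (ls : List (List α)) :
    (ls.map List.length).foldl max 0 = pvN ls := by
  simp [pvFoldl_max_eq, pvN]

theorem pvN_zero_all_nil {α : Type} (ls : List (List α)) (h : pvN ls = 0) :
    ∀ b ∈ ls, b = [] := by
  induction ls with
  | nil => simp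
  | cons it rest ih =>
    simp [pvN, List.foldr_cons] at h ⊢
    exact ⟨h.1, ih h.2⟩

theorem pvN_tails {α : Type} (ls : List (List α)) :
    pvN ((ls.filter (fun b => !b.isEmpty)).map List.tail) = pvN ls - 1 := by
  induction ls with
  | nil => simp [pvN]
  | cons it rest ih =>
    cases it with
    | nil => simp [pvN, List.foldr_cons] at ih ⊢; omega
    | cons x xs => simp [pvN, List.foldr_cons] at ih ⊢; omega

theorem pvLoop_eq {α : Type} [Inhabited α] :
    ∀ (n : Nat) (ls : List (List α)) (acc : List α), pvMu ls ≤ n →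
      pvLoop acc ls = acc ++ (List.range (pvN ls)).flatMap (fun r => pvCol r ls) := by
  intro n
  induction n with
  | zero =>
    intro ls acc h
    have : ls = [] := by
      cases ls with
      | nil => rfl
      | cons a b => simp [pvMu] at h
    subst this
    simp [pvLoop, pvN]
  | succ n ih =>
    intro ls acc h
    by_cases hnil : ls = []
    · subst hnil; simp [pvLoop, pvN]
    · rw [pvLoop]; simp only [hnil, dite_false]
      have hmu : pvMu (pvRound ls).2 ≤ n := by
        have := pvRound_mu_lt ls hnil; omega
      rw [ih _ _ hmu, pvRound_fst, pvRound_snd]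
      rcases hN : pvN ls with _ | m
      · -- all buckets empty: nothing to deal, both sides are acc
        have hall := pvN_zero_all_nil ls hN
        have hc : pvCol 0 ls = [] := by
          simp only [pvCol, List.map_eq_nil_iff, List.filter_eq_nil_iff]
          intro b hb
          simp [hall b hb]
        have ht : (ls.filter (fun b => !b.isEmpty)).map List.tail = ([] : List (List α)) := by
          simp only [List.map_eq_nil_iff, List.filter_eq_nil_iff]
          intro b hb
          simp [hall b hb]
        simp [hc, ht, pvN]
      · -- pvN ls = m+1: split range (m+1) as 0 :: shifted, shift columns through the tails
        have htails : pvN ((ls.filter (fun b => !b.isEmpty)).map List.tail) = m := by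
          rw [pvN_tails, hN]
          omega
        rw [htails, List.range_succ_eq_map]
        simp only [List.flatMap_cons, List.flatMap_map,
          Nat.succ_eq_add_one, pvCol_succ, List.append_assoc]

-- B's inner for-loop over the buckets appends exactly column r
theorem pvInner {α : Type} [Inhabited α] (r : Nat) (ls : List (List α)) (acc : List α) :
    ls.foldl (fun out b => if r < b.length then out ++ [b.getD r default] else out) acc
      = acc ++ pvCol r ls := by
  induction ls generalizing acc with
  | nil => simp [pvCol]
  | cons b rest ih =>
    simp only [List.foldl_cons]
    by_cases h : r < b.length
    · rw [if_pos h, ih]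
      simp [pvCol, h]
    · rw [if_neg h, ih]
      simp [pvCol, h]

-- ===== VERDICT (by name: the statement is the Claim_ definition above) =====
theorem interleave_runs_py_spec : Claim_equal_interleave_runs_py := by
  intro runs _
  unfold Spec_interleave_runs_py interleave_runs_py interleave_runs_py_alt
  have hstep : (fun (out : List (Int × String × String × String × String)) (r : Nat) =>
      (pvBuckets runs).values.foldl (fun out b =>
        if r < b.length then out ++ [b.getD r default] else out) out)
      = fun out r => out ++ pvCol r (pvBuckets runs).values := by
    funext out r
    exact pvInner r (pvBuckets runs).values out
  simp only [hstep]
  rw [PySem.List.foldl_append_eq_flatMap, pvN_eq,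
    pvLoop_eq (pvMu (pvBuckets runs).values) _ _ (le_refl _)]
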